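-- pv_equiv track=rewrite | github.com/jonathanvineet/scrapee | backend/mcp.py | _rank_sources
-- ===== SOURCE A (Python) =====
-- from typing import Any, Callable, Dict, List, Optional, Tuple
--
-- def _rank_sources(sources: List[str]) -> List[str]:
--     """Rank documentation sources: official docs first, GitHub last."""
--     priority: List[str] = []
--     secondary: List[str] = []
--     fallback: List[str] = []
--
--     for s in sources:
--         if "docs." in s or "/docs" in s or "/learn" in s or "/reference" in s:
--             priority.append(s)
--         elif "github.com" in s:
--             fallback.append(s)
--         else:
--             secondary.append(s)
--
--     return priority + secondary + fallback
-- ===== SOURCE B (Python) =====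
-- def _rank_sources(sources):
--     """Rank documentation sources: official docs first, GitHub last."""
--     def rank(s):
--         if "docs." in s or "/docs" in s or "/learn" in s or "/reference" in s:
--             return 0
--         if "github.com" in s:
--             return 2
--         return 1
--     return sorted(sources, key=rank)
-- ===== Notes on version B (the rewrite author's own statement) =====
-- stated objective: alternative
-- what changed: Replaces the three-bucket partition-and-concatenate loop with a single stable sort on a computed priority key (0 docs / 1 other / 2 github), relying on sort stability to preserve relative order within each bucket.
import Mathlib
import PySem

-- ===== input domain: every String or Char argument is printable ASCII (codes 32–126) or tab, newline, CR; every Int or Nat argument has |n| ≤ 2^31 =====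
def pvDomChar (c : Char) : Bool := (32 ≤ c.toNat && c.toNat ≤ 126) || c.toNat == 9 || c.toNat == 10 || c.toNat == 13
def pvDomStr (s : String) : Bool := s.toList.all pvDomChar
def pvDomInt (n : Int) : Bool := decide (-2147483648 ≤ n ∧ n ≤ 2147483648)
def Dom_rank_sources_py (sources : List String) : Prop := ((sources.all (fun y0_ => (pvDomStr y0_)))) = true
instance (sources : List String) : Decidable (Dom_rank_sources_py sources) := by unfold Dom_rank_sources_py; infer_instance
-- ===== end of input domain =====

-- B replaces A's three-bucket partition-and-concatenate with one stable sort on a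
-- computed priority key (alternative decomposition; same observable result).

-- ===== PORT A =====
-- the loop appends each source to one of three buckets, then concatenates them
def rank_sources_py (sources : List String) : List String :=
  let st := sources.foldl
    (fun (acc : List String × List String × List String) s =>
      if PySem.Str.isIn "docs." s || PySem.Str.isIn "/docs" s
          || PySem.Str.isIn "/learn" s || PySem.Str.isIn "/reference" s then
        (acc.1 ++ [s], acc.2.1, acc.2.2)
      else if PySem.Str.isIn "github.com" s then
        (acc.1, acc.2.1, acc.2.2 ++ [s])
      else
        (acc.1, acc.2.1 ++ [s], acc.2.2))
    ([], [], [])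
  st.1 ++ st.2.1 ++ st.2.2

-- ===== PORT B =====
-- B's rank helper: 0 for official docs, 2 for github, 1 otherwise
def pvRank (s : String) : Int :=
  if PySem.Str.isIn "docs." s || PySem.Str.isIn "/docs" s
      || PySem.Str.isIn "/learn" s || PySem.Str.isIn "/reference" s then 0
  else if PySem.Str.isIn "github.com" s then 2
  else 1

def rank_sources_py_alt (sources : List String) : List String :=
  PySem.List.sorted sources pvRank false

-- ===== PRECONDITION & SPEC =====
def Spec_rank_sources_py (sources : List String) (out : List String) : Prop := out = rank_sources_py_alt sources
instance (sources : List String) (out : List String) : Decidable (Spec_rank_sources_py sources out) := by unfold Spec_rank_sources_py; infer_instance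

-- ===== CLAIM (what is proved, stated in full; the proofs are below) =====
def Claim_equal_rank_sources_py : Prop := ∀ (sources : List String), Dom_rank_sources_py sources → Spec_rank_sources_py sources (rank_sources_py sources)

-- ===== LEMMAS AND PROOFS =====

-- membership in the rank-i filter pins the rank
theorem pvRank_of_mem_filter {i : Int} {s : String} {xs : List String}
    (h : s ∈ xs.filter (fun y => pvRank y == i)) : pvRank s = i := by
  have := (List.mem_filter.mp h).2
  simpa using this

-- insertBy passes over a prefix it does not insert before
theorem insertBy_skip {α : Type} (before : α → α → Bool) (x : α) (p q : List α)
    (h : ∀ y ∈ p, before x y = false) :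
    PySem.List.insertBy before x (p ++ q) = p ++ PySem.List.insertBy before x q := by
  induction p with
  | nil => simp
  | cons y p ih =>
    have hy : before x y = false := h y (by simp)
    simp only [List.cons_append, PySem.List.insertBy, hy]
    simp [ih (fun z hz => h z (by simp [hz]))]

-- insertBy puts x in front when it goes before everything
theorem insertBy_all_before {α : Type} (before : α → α → Bool) (x : α) (q : List α)
    (h : ∀ y ∈ q, before x y = true) :
    PySem.List.insertBy before x q = x :: q := by
  cases q with
  | nil => rfl
  | cons y q => simp [PySem.List.insertBy, h y (by simp)]

-- A's loop, characterised by the three rank filters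
theorem rank_loop_char (xs : List String) :
    ∀ (p s f : List String),
    xs.foldl
      (fun (acc : List String × List String × List String) s =>
        if PySem.Str.isIn "docs." s || PySem.Str.isIn "/docs" s
            || PySem.Str.isIn "/learn" s || PySem.Str.isIn "/reference" s then
          (acc.1 ++ [s], acc.2.1, acc.2.2)
        else if PySem.Str.isIn "github.com" s then
          (acc.1, acc.2.1, acc.2.2 ++ [s])
        else
          (acc.1, acc.2.1 ++ [s], acc.2.2)) (p, s, f)
    = (p ++ xs.filter (fun y => pvRank y == (0:Int)),
       s ++ xs.filter (fun y => pvRank y == (1:Int)),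
       f ++ xs.filter (fun y => pvRank y == (2:Int))) := by
  induction xs with
  | nil => intro p s f; simp
  | cons x xs ih =>
    intro p s f
    by_cases h0 : (PySem.Str.isIn "docs." x || PySem.Str.isIn "/docs" x
        || PySem.Str.isIn "/learn" x || PySem.Str.isIn "/reference" x) = true
    · have hr : pvRank x = 0 := by unfold pvRank; rw [if_pos h0]
      simp only [List.foldl_cons]
      rw [if_pos h0, ih]
      simp [hr]
    · by_cases hg : PySem.Str.isIn "github.com" x = true
      · have hr : pvRank x = 2 := by unfold pvRank; rw [if_neg h0, if_pos hg]
        simp only [List.foldl_cons]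
        rw [if_neg h0, if_pos hg, ih]
        simp [hr]
      · have hr : pvRank x = 1 := by unfold pvRank; rw [if_neg h0, if_neg hg]
        simp only [List.foldl_cons]
        rw [if_neg h0, if_neg hg, ih]
        simp [hr]

-- the stable sort equals the concatenation of the three rank filters
theorem sorted_rank_char (xs : List String) :
    PySem.List.sorted xs pvRank false
      = xs.filter (fun y => pvRank y == (0:Int))
        ++ xs.filter (fun y => pvRank y == (1:Int))
        ++ xs.filter (fun y => pvRank y == (2:Int)) := by
  induction xs using List.reverseRecOn with
  | nil => simp [PySem.List.sorted_eq_foldl_insertBy]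
  | append_singleton xs x ih =>
    rw [PySem.List.sorted_eq_foldl_insertBy] at ih ⊢
    rw [List.foldl_append, List.foldl_cons, List.foldl_nil, ih]
    by_cases h0 : (PySem.Str.isIn "docs." x || PySem.Str.isIn "/docs" x
        || PySem.Str.isIn "/learn" x || PySem.Str.isIn "/reference" x) = true
    · have hr : pvRank x = 0 := by unfold pvRank; rw [if_pos h0]
      rw [List.append_assoc,
          insertBy_skip _ _ _ _ (fun y hy => by
            simp [pvRank_of_mem_filter hy, hr]),
          insertBy_all_before _ _ _ (fun y hy => by
            rcases List.mem_append.mp hy with h | h <;>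
              simp [pvRank_of_mem_filter h, hr])]
      simp [List.filter_append, hr]
    · by_cases hg : PySem.Str.isIn "github.com" x = true
      · have hr : pvRank x = 2 := by unfold pvRank; rw [if_neg h0, if_pos hg]
        rw [PySem.List.insertBy_of_forall_not_before _ _ _ (fun y hy => by
            rcases List.mem_append.mp hy with h | h
            · rcases List.mem_append.mp h with h | h <;>
                simp [pvRank_of_mem_filter h, hr]
            · simp [pvRank_of_mem_filter h, hr])]
        simp [List.filter_append, hr]
      · have hr : pvRank x = 1 := by unfold pvRank; rw [if_neg h0, if_neg hg]
        rw [insertBy_skip _ _ _ _ (fun y hy => by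
              rcases List.mem_append.mp hy with h | h <;>
                simp [pvRank_of_mem_filter h, hr]),
            insertBy_all_before _ _ _ (fun y hy => by
              simp [pvRank_of_mem_filter hy, hr])]
        simp [List.filter_append, hr]

-- ===== VERDICT (by name: the statement is the Claim_ definition above) =====
theorem rank_sources_py_spec : Claim_equal_rank_sources_py := by
  intro sources _
  unfold Spec_rank_sources_py rank_sources_py rank_sources_py_alt
  rw [rank_loop_char, sorted_rank_char]
  simp
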